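-- pv_equiv track=rewrite | github.com/pypi-data/pypi-mirror-401 | packages/respondo/respondo-0.3.1-py3-none-any.whl/jsonutil.py | _json_segments
-- ===== SOURCE A (Python) =====
-- def _json_segments(text: str) -> list[tuple[int, int]]:
--     segments: list[tuple[int, int]] = []
--     stack: list[str] = []
--     start = -1
--     in_string = False
--     escaped = False
--
--     for idx, ch in enumerate(text):
--         if in_string:
--             if escaped:
--                 escaped = False
--                 continue
--             if ch == "\\":
--                 escaped = True
--                 continue
--             if ch == '"':
--                 in_string = False
--             continue
--
--         if ch == '"':
--             in_string = True
--             continue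
--         if ch in "{[":
--             if not stack:
--                 start = idx
--             stack.append(ch)
--         elif ch in "}]":
--             if not stack:
--                 continue
--             open_ch = stack.pop()
--             if (open_ch == "{" and ch == "}") or (open_ch == "[" and ch == "]"):
--                 if not stack and start >= 0:
--                     segments.append((start, idx + 1))
--                     start = -1
--             else:
--                 start = -1
--                 stack.clear()
--     return segments
-- ===== SOURCE B (Python) =====
-- def _json_segments(text: str) -> list[tuple[int, int]]:
--     # Pass 1: lex — keep only structural bracket characters outside strings.
--     tokens: list[tuple[int, str]] = []
--     in_string = False
--     escaped = False
--     for idx, ch in enumerate(text):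
--         if in_string:
--             if escaped:
--                 escaped = False
--             elif ch == "\\":
--                 escaped = True
--             elif ch == '"':
--                 in_string = False
--         elif ch == '"':
--             in_string = True
--         elif ch in "{[}]":
--             tokens.append((idx, ch))
--
--     # Pass 2: match brackets over the token stream.
--     segments: list[tuple[int, int]] = []
--     stack: list[str] = []
--     start = -1
--     for idx, ch in tokens:
--         if ch in "{[":
--             if not stack:
--                 start = idx
--             stack.append(ch)
--         else:
--             if not stack:
--                 continue
--             open_ch = stack.pop()
--             if (open_ch == "{" and ch == "}") or (open_ch == "[" and ch == "]"):
--                 if not stack and start >= 0: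
--                     segments.append((start, idx + 1))
--                     start = -1
--             else:
--                 start = -1
--                 stack.clear()
--     return segments
-- ===== Notes on version B (the rewrite author's own statement) =====
-- stated objective: alternative
-- what changed: Splits A's single interleaved loop into two passes: a lexer that scans the text once emitting (index, char) tokens for brackets outside strings, and a separate matcher fold over that token list maintaining the stack and start index.
import Mathlib
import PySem

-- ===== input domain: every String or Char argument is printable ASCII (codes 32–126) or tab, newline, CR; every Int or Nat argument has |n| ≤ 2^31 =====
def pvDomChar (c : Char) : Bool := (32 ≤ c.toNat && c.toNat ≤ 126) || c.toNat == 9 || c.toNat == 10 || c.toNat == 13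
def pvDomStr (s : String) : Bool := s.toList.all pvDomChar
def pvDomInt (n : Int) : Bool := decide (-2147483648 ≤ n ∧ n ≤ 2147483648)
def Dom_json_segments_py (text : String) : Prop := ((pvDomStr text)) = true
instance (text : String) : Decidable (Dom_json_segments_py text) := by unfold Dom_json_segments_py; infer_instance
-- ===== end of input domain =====

-- B separates A's single interleaved loop into a lexing pass (brackets outside strings)
-- and a separate bracket-matching fold over the token list; objective: alternative decomposition.

-- ===== PORT A =====
-- A's single loop; the Python appends/pops at the list end, ported as push/pop at the
-- head of `stack` (same values in reverse storage order; `stack.clear()` = []).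
def jsonAloop : List Char → Int → List (Int × Int) → List Char → Int → Bool → Bool → List (Int × Int)
  | [], _, segs, _, _, _, _ => segs
  | ch :: rest, idx, segs, stack, start, instr, esc =>
    if instr then
      if esc then jsonAloop rest (idx + 1) segs stack start instr false
      else if ch = '\\' then jsonAloop rest (idx + 1) segs stack start instr true
      else if ch = '"' then jsonAloop rest (idx + 1) segs stack start false esc
      else jsonAloop rest (idx + 1) segs stack start instr esc
    else if ch = '"' then jsonAloop rest (idx + 1) segs stack start true esc
    else if ch = '{' ∨ ch = '[' then
      jsonAloop rest (idx + 1) segs (ch :: stack) (if stack = [] then idx else start) instr esc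
    else if ch = '}' ∨ ch = ']' then
      match stack with
      | [] => jsonAloop rest (idx + 1) segs stack start instr esc
      | open_ch :: stackRest =>
        if (open_ch = '{' ∧ ch = '}') ∨ (open_ch = '[' ∧ ch = ']') then
          if stackRest = [] ∧ start ≥ 0 then
            jsonAloop rest (idx + 1) (segs ++ [(start, idx + 1)]) stackRest (-1) instr esc
          else jsonAloop rest (idx + 1) segs stackRest start instr esc
        else jsonAloop rest (idx + 1) segs [] (-1) instr esc
    else jsonAloop rest (idx + 1) segs stack start instr esc

def json_segments_py (text : String) : List (Int × Int) :=
  jsonAloop text.toList 0 [] [] (-1) false false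

-- ===== PORT B =====
-- Pass 1: lexer emitting (index, char) for brackets outside strings.
def jsonBlex : List Char → Int → Bool → Bool → List (Int × Char)
  | [], _, _, _ => []
  | ch :: rest, idx, instr, esc =>
    if instr then
      if esc then jsonBlex rest (idx + 1) instr false
      else if ch = '\\' then jsonBlex rest (idx + 1) instr true
      else if ch = '"' then jsonBlex rest (idx + 1) false esc
      else jsonBlex rest (idx + 1) instr esc
    else if ch = '"' then jsonBlex rest (idx + 1) true esc
    else if ch = '{' ∨ ch = '[' ∨ ch = '}' ∨ ch = ']' then
      (idx, ch) :: jsonBlex rest (idx + 1) instr esc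
    else jsonBlex rest (idx + 1) instr esc

-- Pass 2: one matcher step on state (segments, stack, start).
def jsonBstep : List (Int × Int) × List Char × Int → Int × Char → List (Int × Int) × List Char × Int
  | (segs, stack, start), (idx, ch) =>
    if ch = '{' ∨ ch = '[' then
      (segs, ch :: stack, if stack = [] then idx else start)
    else
      match stack with
      | [] => (segs, stack, start)
      | open_ch :: stackRest =>
        if (open_ch = '{' ∧ ch = '}') ∨ (open_ch = '[' ∧ ch = ']') then
          if stackRest = [] ∧ start ≥ 0 then (segs ++ [(start, idx + 1)], stackRest, -1)
          else (segs, stackRest, start)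
        else (segs, [], -1)

def json_segments_py_alt (text : String) : List (Int × Int) :=
  ((jsonBlex text.toList 0 false false).foldl jsonBstep ([], [], -1)).1

-- ===== PRECONDITION & SPEC =====
def Spec_json_segments_py (text : String) (out : List (Int × Int)) : Prop := out = json_segments_py_alt text
instance (text : String) (out : List (Int × Int)) : Decidable (Spec_json_segments_py text out) := by unfold Spec_json_segments_py; infer_instance

-- ===== CLAIM (what is proved, stated in full; the proofs are below) =====
def Claim_equal_json_segments_py : Prop := ∀ (text : String), Dom_json_segments_py text → Spec_json_segments_py text (json_segments_py text)

-- ===== LEMMAS AND PROOFS =====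
theorem jsonA_eq_B : ∀ (chars : List Char) (idx : Int) (segs : List (Int × Int))
    (stack : List Char) (start : Int) (instr esc : Bool),
    jsonAloop chars idx segs stack start instr esc =
      ((jsonBlex chars idx instr esc).foldl jsonBstep (segs, stack, start)).1 := by
  intro chars
  induction chars with
  | nil => intro idx segs stack start instr esc; simp [jsonAloop, jsonBlex]
  | cons ch rest ih =>
    intro idx segs stack start instr esc
    cases instr with
    | true =>
      cases esc with
      | true => simp [jsonAloop, jsonBlex, ih]
      | false =>
        by_cases h1 : ch = '\\'
        · simp [jsonAloop, jsonBlex, h1, ih]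
        · by_cases h2 : ch = '"' <;> simp [jsonAloop, jsonBlex, h1, h2, ih]
    | false =>
      by_cases h2 : ch = '"'
      · simp [jsonAloop, jsonBlex, h2, ih]
      · by_cases h3 : ch = '{' ∨ ch = '['
        · have h5 : ch = '{' ∨ ch = '[' ∨ ch = '}' ∨ ch = ']' := by tauto
          simp [jsonAloop, jsonBlex, h2, h3, h5, ih, jsonBstep]
        · by_cases h4 : ch = '}' ∨ ch = ']'
          · have h5 : ch = '{' ∨ ch = '[' ∨ ch = '}' ∨ ch = ']' := by tauto
            cases stack with
            | nil => simp [jsonAloop, jsonBlex, h2, h3, h4, h5, ih, jsonBstep]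
            | cons open_ch stackRest =>
              by_cases h6 : (open_ch = '{' ∧ ch = '}') ∨ (open_ch = '[' ∧ ch = ']')
              · by_cases h7 : stackRest = [] ∧ start ≥ 0 <;>
                  simp [jsonAloop, jsonBlex, h2, h3, h4, h5, h6, h7, ih, jsonBstep]
              · simp [jsonAloop, jsonBlex, h2, h3, h4, h6, ih, jsonBstep]
          · have h5 : ¬ (ch = '{' ∨ ch = '[' ∨ ch = '}' ∨ ch = ']') := by tauto
            simp [jsonAloop, jsonBlex, h2, h3, h4, ih]

-- ===== VERDICT (by name: the statement is the Claim_ definition above) =====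
theorem json_segments_py_spec : Claim_equal_json_segments_py := by
  intro text _
  unfold Spec_json_segments_py json_segments_py json_segments_py_alt
  exact jsonA_eq_B _ _ _ _ _ _ _
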